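-- pv_equiv track=rewrite | github.com/nigh7fox/ISCRIP | Oplevering-3/Vierkantvanpascal.py | vierkant
-- ===== SOURCE A (Python) =====
-- def vierkant(cells, n=1) -> [[]]:
--     answer = []
--     curr_cells = []
--     #   add first row
--     for y in range(cells):
--         curr_cells.append(n)
--     for cell in range(cells):
--         #   begin bij de eerste cell en verander de current naar de nieuwe cell als laats/
--         new_cells = [n]
--         #   voor alle cijfers in de grote van de cells(gegeven) voeg een nieuwe cijfer toe
--         #   waarbij de cijfer gelijk is aan de (index + 1) + new_cells[index]
--         #   hier doen we de kruis plus -> [x+1] naar x == nieuwe cijfer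
--         for x in range(cells-1):
--             new_cells.append(curr_cells[x+1] + new_cells[x])
--         #   voeg nieuwe cijfers toe aan antwoord
--         answer.append(curr_cells)
--         #   ga een stap verder en verander de current_cells met de nieuwe voor volgende
--         #   stap in de for loop
--         curr_cells = new_cells
--     return answer
-- ===== SOURCE B (Python) =====
-- def vierkant(cells, n=1):
--     # Each row is computed independently from the binomial closed form
--     # entry[i][j] = n * C(i+j, j), via the multiplicative recurrence
--     # C(i+j+1, j+1) = C(i+j, j) * (i+j+1) / (j+1); no state is shared between rows.
--     answer = []
--     for i in range(cells):
--         row = [n]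
--         for j in range(cells - 1):
--             row.append(row[j] * (i + j + 1) // (j + 1))
--         answer.append(row)
--     return answer
-- ===== Notes on version B (the rewrite author's own statement) =====
-- stated objective: alternative
-- what changed: B computes every row independently from the binomial closed form n*C(i+j,j) via a multiplicative recurrence along the row, instead of propagating the previous row through an additive cross-sum as A does.
import Mathlib
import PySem

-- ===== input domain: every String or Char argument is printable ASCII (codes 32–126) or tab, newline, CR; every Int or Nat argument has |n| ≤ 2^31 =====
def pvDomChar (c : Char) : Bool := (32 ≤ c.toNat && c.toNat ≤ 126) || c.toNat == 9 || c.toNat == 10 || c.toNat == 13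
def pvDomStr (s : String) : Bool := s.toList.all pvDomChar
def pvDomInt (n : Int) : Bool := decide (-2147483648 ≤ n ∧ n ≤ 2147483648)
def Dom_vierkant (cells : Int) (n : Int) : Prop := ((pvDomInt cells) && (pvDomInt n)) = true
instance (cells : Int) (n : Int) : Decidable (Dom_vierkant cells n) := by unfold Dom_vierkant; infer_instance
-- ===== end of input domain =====

-- B computes every row independently from the binomial closed form (multiplicative
-- recurrence along the row) instead of A's additive propagation of the previous row.

-- ===== PORT A =====
-- literal transliteration of A: build first row, then repeatedly derive new_cells
-- from curr_cells by the additive cross rule, collecting curr_cells into answer.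
def vierkant (cells : Int) (n : Int) : List (List Int) :=
  let curr0 : List Int := (PySem.List.pyRange 0 cells 1).foldl (fun acc _ => acc ++ [n]) []
  let st := (PySem.List.pyRange 0 cells 1).foldl
    (fun (st : List (List Int) × List Int) _ =>
      let newc := (PySem.List.pyRange 0 (cells - 1) 1).foldl
        (fun nc x => nc ++ [PySem.List.pyGetD st.2 (x + 1) 0 + PySem.List.pyGetD nc x 0]) [n]
      (st.1 ++ [st.2], newc))
    (([] : List (List Int)), curr0)
  st.1

-- ===== PORT B =====
-- literal transliteration of Source B: each row built independently by the
-- multiplicative recurrence row[j+1] = row[j]*(i+j+1)//(j+1).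
def vierkant_alt (cells : Int) (n : Int) : List (List Int) :=
  (PySem.List.pyRange 0 cells 1).foldl
    (fun answer i =>
      answer ++ [(PySem.List.pyRange 0 (cells - 1) 1).foldl
        (fun row j => row ++ [PySem.Int.floordiv (PySem.List.pyGetD row j 0 * (i + j + 1)) (j + 1)])
        [n]])
    []

-- ===== PRECONDITION & SPEC =====
def Spec_vierkant (cells : Int) (n : Int) (out : List (List Int)) : Prop := out = vierkant_alt cells n
instance (cells : Int) (n : Int) (out : List (List Int)) : Decidable (Spec_vierkant cells n out) := by unfold Spec_vierkant; infer_instance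

-- ===== CLAIM (what is proved, stated in full; the proofs are below) =====
def Claim_equal_vierkant : Prop := ∀ (cells : Int) (n : Int), Dom_vierkant cells n → Spec_vierkant cells n (vierkant cells n)

-- ===== LEMMAS AND PROOFS =====

-- the common mathematical description: row i, entry j is n * C(i+j, j)
def rowS (i m : Nat) (n : Int) : List Int :=
  (List.range m).map (fun j => n * ((i + j).choose j : Int))

theorem rowS_getD (i m j : Nat) (n : Int) (h : j < m) :
    (rowS i m n).getD j 0 = n * ((i + j).choose j : Int) := by
  simp [rowS, List.getD_eq_getElem?_getD, h]

theorem rowS_succ (i m : Nat) (n : Int) :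
    rowS i (m + 1) n = rowS i m n ++ [n * ((i + m).choose m : Int)] := by
  simp [rowS, List.range_succ]

-- exact division step of B: row[j] * (i+j+1) // (j+1) is the next binomial entry
theorem step_mul (i t : Nat) (n : Int) :
    PySem.Int.floordiv (n * ((i + t).choose t : Int) * ((i : Int) + t + 1)) ((t : Int) + 1)
      = n * ((i + t + 1).choose (t + 1) : Int) := by
  have h : ((i + t + 1) : Int) * ((i + t).choose t : Int)
      = ((i + t + 1).choose (t + 1) : Int) * ((t : Int) + 1) := by
    exact_mod_cast congrArg (Nat.cast : Nat → Int) (Nat.add_one_mul_choose_eq (i + t) t)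
  have hpos : (0 : Int) < (t : Int) + 1 := by positivity
  rw [PySem.Int.floordiv_eq_ediv_of_pos hpos]
  have : n * ((i + t).choose t : Int) * ((i : Int) + t + 1)
      = n * ((i + t + 1).choose (t + 1) : Int) * ((t : Int) + 1) := by
    push_cast at h ⊢; linear_combination n * h
  rw [this, Int.mul_ediv_cancel _ (by omega)]

-- B's inner loop builds row i from the closed form
theorem foldB (i t : Nat) (n : Int) :
    (PySem.List.pyRange 0 (t : Int) 1).foldl
      (fun row j => row ++ [PySem.Int.floordiv (PySem.List.pyGetD row j 0 * ((i : Int) + j + 1)) (j + 1)])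
      [n] = rowS i (t + 1) n := by
  induction t with
  | zero => simp [rowS]
  | succ t ih =>
      rw [show (((t+1 : Nat)) : Int) = (t : Int) + 1 from by push_cast; ring]
      rw [PySem.List.pyRange_one_succ_right (by positivity), List.foldl_append, ih]
      simp only [List.foldl_cons, List.foldl_nil]
      rw [PySem.List.pyGetD_natCast, rowS_getD i (t+1) t n (by omega), step_mul]
      simp [rowS_succ]
      left; rw [Nat.add_assoc]

-- A's inner loop turns row i into row i+1 (Pascal's additive rule)
theorem foldA (i c t : Nat) (n : Int) (ht : t + 1 ≤ c) :
    (PySem.List.pyRange 0 (t : Int) 1).foldl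
      (fun nc x => nc ++ [PySem.List.pyGetD (rowS i c n) (x + 1) 0 + PySem.List.pyGetD nc x 0])
      [n] = rowS (i + 1) (t + 1) n := by
  induction t with
  | zero => simp [rowS]
  | succ t ih =>
      rw [show (((t+1 : Nat)) : Int) = (t : Int) + 1 from by push_cast; ring]
      rw [PySem.List.pyRange_one_succ_right (by positivity), List.foldl_append,
        ih (by omega)]
      simp only [List.foldl_cons, List.foldl_nil]
      rw [show ((t : Int) + 1) = (((t+1 : Nat)) : Int) from by push_cast; ring,
        PySem.List.pyGetD_natCast, PySem.List.pyGetD_natCast,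
        rowS_getD i c (t+1) n (by omega), rowS_getD (i+1) (t+1) t n (by omega),
        rowS_succ (i+1) (t+1) n]
      congr 1
      have hp : ((i + 1 + (t + 1)).choose (t + 1) : Int)
          = ((i + (t + 1)).choose (t + 1) : Int) + ((i + 1 + t).choose t : Int) := by
        rw [show i + 1 + (t + 1) = (i + t + 1) + 1 from by ring,
          Nat.choose_succ_succ (i + t + 1) t,
          show i + 1 + t = i + t + 1 from by ring, show i + (t + 1) = i + t + 1 from by ring]
        push_cast; ring
      simp only [List.cons.injEq, and_true]
      rw [hp]; ring

-- A's outer loop invariant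
theorem foldOuterA (c k : Nat) (n : Int) (hk : k ≤ c) :
    (PySem.List.pyRange 0 (k : Int) 1).foldl
      (fun (st : List (List Int) × List Int) _ =>
        let newc := (PySem.List.pyRange 0 ((c : Int) - 1) 1).foldl
          (fun nc x => nc ++ [PySem.List.pyGetD st.2 (x + 1) 0 + PySem.List.pyGetD nc x 0]) [n]
        (st.1 ++ [st.2], newc))
      (([] : List (List Int)), rowS 0 c n)
      = ((List.range k).map (fun i => rowS i c n), rowS k c n) := by
  induction k with
  | zero => simp
  | succ k ih =>
      rw [show (((k+1 : Nat)) : Int) = (k : Int) + 1 from by push_cast; ring]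
      rw [PySem.List.pyRange_one_succ_right (by positivity), List.foldl_append,
        ih (by omega)]
      simp only [List.foldl_cons, List.foldl_nil]
      have hc : 1 ≤ c := by omega
      have h1 : ((c : Int) - 1) = (((c - 1 : Nat)) : Int) := by omega
      rw [h1, foldA k c (c - 1) n (by omega)]
      rw [show c - 1 + 1 = c from by omega]
      simp [List.range_succ]

theorem vierkant_eq (c : Nat) (n : Int) :
    vierkant (c : Int) n = (List.range c).map (fun i => rowS i c n) := by
  have hcurr : ((PySem.List.pyRange 0 (c : Int) 1).foldl (fun acc _ => acc ++ [n]) ([] : List Int))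
      = rowS 0 c n := by
    rw [PySem.List.foldl_append_singleton_eq_map (fun _ => n)]
    simp [PySem.List.pyRange_zero_nat, rowS, Nat.choose_self, List.map_map, Function.comp_def, List.map_const']
  show ((PySem.List.pyRange 0 (c : Int) 1).foldl
      (fun (st : List (List Int) × List Int) _ =>
        let newc := (PySem.List.pyRange 0 ((c : Int) - 1) 1).foldl
          (fun nc x => nc ++ [PySem.List.pyGetD st.2 (x + 1) 0 + PySem.List.pyGetD nc x 0]) [n]
        (st.1 ++ [st.2], newc))
      (([] : List (List Int)),
        (PySem.List.pyRange 0 (c : Int) 1).foldl (fun acc _ => acc ++ [n]) ([] : List Int))).1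
      = (List.range c).map (fun i => rowS i c n)
  rw [hcurr, foldOuterA c c n le_rfl]

theorem vierkant_alt_eq (c : Nat) (n : Int) :
    vierkant_alt (c : Int) n = (List.range c).map (fun i => rowS i c n) := by
  unfold vierkant_alt
  rw [PySem.List.foldl_append_singleton_eq_map
    (fun i => (PySem.List.pyRange 0 ((c : Int) - 1) 1).foldl
      (fun row j => row ++ [PySem.Int.floordiv (PySem.List.pyGetD row j 0 * (i + j + 1)) (j + 1)]) [n])]
  rw [List.nil_append, PySem.List.pyRange_zero_nat, List.map_map]
  refine List.map_congr_left (fun k hk => ?_)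
  have hc : 1 ≤ c := by
    rcases List.mem_range.mp hk with h; omega
  have h1 : ((c : Int) - 1) = (((c - 1 : Nat)) : Int) := by omega
  simp only [Function.comp]
  rw [h1, foldB k (c - 1) n, show c - 1 + 1 = c from by omega]

-- ===== VERDICT (by name: the statement is the Claim_ definition above) =====
theorem vierkant_spec : Claim_equal_vierkant := by
  intro cells n _
  unfold Spec_vierkant
  by_cases h : cells ≤ 0
  · simp [vierkant, vierkant_alt, PySem.List.pyRange_one_eq_nil h]
  · obtain ⟨c, rfl⟩ : ∃ c : Nat, cells = (c : Int) :=
      ⟨cells.toNat, (Int.toNat_of_nonneg (by omega)).symm⟩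
    rw [vierkant_eq, vierkant_alt_eq]
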